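-- pv_equiv track=rewrite | github.com/0xstillb/grimmory-bridge | opf_to_grimmory_json.py | normalize_allowed_exts
-- ===== SOURCE A (Python) =====
-- from typing import Callable, Iterable
--
-- SUPPORTED_BOOK_EXTS = {
--     ".pdf",
--     ".epub",
--     ".mobi",
--     ".azw3",
--     ".cbz",
--     ".cbr",
--     ".cb7",
-- }
--
-- def normalize_extensions(ext_value: str) -> set[str]:
--     if not ext_value.strip():
--         return set()
--     result = set()
--     for part in ext_value.split(","):
--         cleaned = part.strip().lower()
--         if not cleaned:
--             continue
--         if not cleaned.startswith("."):
--             cleaned = f".{cleaned}"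
--         result.add(cleaned)
--     return result
--
-- def normalize_allowed_exts(ext_value: str, log: Callable[[str], None] = print) -> set[str]:
--     allowed_exts = normalize_extensions(ext_value)
--     if allowed_exts:
--         unknown = sorted(ext for ext in allowed_exts if ext not in SUPPORTED_BOOK_EXTS)
--         if unknown:
--             log(
--                 "WARNING unsupported ext filters will be ignored: "
--                 + ", ".join(unknown)
--             )
--             allowed_exts = {ext for ext in allowed_exts if ext in SUPPORTED_BOOK_EXTS}
--     return allowed_exts
-- ===== SOURCE B (Python) =====
-- from typing import Callable
--
-- SUPPORTED_BOOK_EXTS = {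
--     ".pdf",
--     ".epub",
--     ".mobi",
--     ".azw3",
--     ".cbz",
--     ".cbr",
--     ".cb7",
-- }
--
-- def normalize_allowed_exts(ext_value: str, log: Callable[[str], None] = print) -> set[str]:
--     # One character-level scan: no split()/strip()/lower() passes. Tokens are cut at
--     # commas while whitespace-stripping and lowercasing happen in-flight (leading
--     # whitespace is never buffered; `keep` marks the end before trailing whitespace),
--     # and each finished token is routed to known/unknown the moment it completes.
--     known: set[str] = set()
--     unknown: set[str] = set()
--     buf = ""   # current token, lowercased, with leading whitespace skipped
--     keep = 0   # length of buf up to its last non-whitespace character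
--     for c in ext_value + ",":
--         if c == ",":
--             tok = buf[:keep]
--             buf, keep = "", 0
--             if tok:
--                 if not tok.startswith("."):
--                     tok = "." + tok
--                 (known if tok in SUPPORTED_BOOK_EXTS else unknown).add(tok)
--         elif c.isspace():
--             if buf:
--                 buf += c
--         else:
--             buf += c.lower()
--             keep = len(buf)
--     if unknown:
--         log("WARNING unsupported ext filters will be ignored: " + ", ".join(sorted(unknown)))
--     return known
-- ===== Notes on version B (the rewrite author's own statement) =====
-- stated objective: alternative
-- what changed: Replaced A's staged pipeline (split on commas, strip+lower each piece, build a set, sort-filter it, filter again) by a single character-level scanner that cuts tokens at commas, strips whitespace and lowercases in-flight, and routes each finished token into the known/unknown sets the moment it completes; no split/strip/lower calls remain.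
import Mathlib
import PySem

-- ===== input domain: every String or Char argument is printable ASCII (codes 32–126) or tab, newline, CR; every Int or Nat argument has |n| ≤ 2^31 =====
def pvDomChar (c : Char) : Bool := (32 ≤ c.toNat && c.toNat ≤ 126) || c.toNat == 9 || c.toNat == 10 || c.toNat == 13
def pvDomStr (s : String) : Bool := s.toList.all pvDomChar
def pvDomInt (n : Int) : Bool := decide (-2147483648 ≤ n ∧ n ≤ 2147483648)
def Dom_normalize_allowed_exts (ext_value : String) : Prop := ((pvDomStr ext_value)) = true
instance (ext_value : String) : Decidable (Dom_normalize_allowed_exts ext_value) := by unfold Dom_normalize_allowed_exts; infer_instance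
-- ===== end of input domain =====

-- B replaces A's split/strip/lower/filter pipeline by a single character-level scan that cuts
-- tokens at commas, strips and lowercases in-flight, and routes each finished token as it
-- completes (objective: alternative). Only the RETURN value is proved equal; the Python `log`
-- callback side effect (identical warning text in A and B) is not modelled.

-- ===== PORT A =====
def pvSupportedBookExts : PySem.Set String :=
  [".pdf", ".epub", ".mobi", ".azw3", ".cbz", ".cbr", ".cb7"]

-- cleaned = part.strip().lower()
def pvCleaned (part : String) : String := PySem.Str.lower (PySem.Str.strip part)

-- cleaned = f".{cleaned}" unless it already starts with "."
def pvDotted (cleaned : String) : String :=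
  if PySem.Str.startswith cleaned "." then cleaned else "." ++ cleaned

-- loop body of normalize_extensions
def pvStepA (result : PySem.Set String) (part : String) : PySem.Set String :=
  let cleaned := pvCleaned part
  if cleaned = "" then result
  else PySem.Set.add result (pvDotted cleaned)

def normalize_extensions (ext_value : String) : PySem.Set String :=
  if PySem.Str.strip ext_value = "" then PySem.Set.empty
  else ((PySem.Str.split? ext_value ",").getD []).foldl pvStepA PySem.Set.empty

def normalize_allowed_exts (ext_value : String) : List String :=
  let allowed_exts := normalize_extensions ext_value
  if allowed_exts = [] then allowed_exts
  else
    let unknown := PySem.List.sorted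
      (allowed_exts.filter (fun ext => !PySem.Set.contains pvSupportedBookExts ext))
      (fun x => x) false
    if unknown = [] then allowed_exts
    else allowed_exts.filter (fun ext => PySem.Set.contains pvSupportedBookExts ext)

-- ===== PORT B =====
-- end of a token (a comma was read): tok = buf[:keep]; if non-empty, dot it and route it
def pvScanFlush (ku : PySem.Set String × PySem.Set String) (tok : List Char) :
    PySem.Set String × PySem.Set String :=
  if tok = [] then ku
  else
    let ext := String.ofList (if PySem.Chars.startswith tok ['.'] then tok else '.' :: tok)
    if PySem.Set.contains pvSupportedBookExts ext then (PySem.Set.add ku.1 ext, ku.2)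
    else (ku.1, PySem.Set.add ku.2 ext)

-- one scanned character: comma = flush; whitespace buffered only inside a token; other
-- characters are lowercased and advance `keep` past them
def pvScanStep (st : (PySem.Set String × PySem.Set String) × List Char × Nat) (c : Char) :
    (PySem.Set String × PySem.Set String) × List Char × Nat :=
  if c = ',' then
    (pvScanFlush st.1 (st.2.1.take st.2.2), ([], 0))
  else if PySem.Chars.isspace c then
    (if st.2.1 = [] then st else (st.1, (st.2.1 ++ [c], st.2.2)))
  else
    (st.1, (st.2.1 ++ [PySem.Chars.lowerChar c], st.2.1.length + 1))

def normalize_allowed_exts_alt (ext_value : String) : List String :=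
  (((ext_value ++ ",").toList).foldl pvScanStep
    ((PySem.Set.empty, PySem.Set.empty), ([], 0))).1.1

-- ===== PRECONDITION & SPEC =====
def Spec_normalize_allowed_exts (ext_value : String) (out : List String) : Prop := out = normalize_allowed_exts_alt ext_value
instance (ext_value : String) (out : List String) : Decidable (Spec_normalize_allowed_exts ext_value out) := by unfold Spec_normalize_allowed_exts; infer_instance

-- ===== CLAIM (what is proved, stated in full; the proofs are below) =====
def Claim_equal_normalize_allowed_exts : Prop := ∀ (ext_value : String), Dom_normalize_allowed_exts ext_value → Spec_normalize_allowed_exts ext_value (normalize_allowed_exts ext_value)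

-- ===== LEMMAS AND PROOFS =====

-- comma-split, as B's scanner realises it: peel the comma-free head, recurse after the comma
def pvSplit (s : List Char) : List (List Char) :=
  match h : s.dropWhile (fun c => !(c == ',')) with
  | [] => [s.takeWhile (fun c => !(c == ','))]
  | _ :: rest => s.takeWhile (fun c => !(c == ',')) :: pvSplit rest
termination_by s.length
decreasing_by
  have h1 : (s.dropWhile (fun c => !(c == ','))).length ≤ s.length :=
    List.IsSuffix.length_le (List.dropWhile_suffix _)
  rw [h] at h1
  simp at h1
  omega

-- pvSplit unfolding, selected by the observed dropWhile
theorem pv_pvSplit_nil (s : List Char) (h : s.dropWhile (fun c => !(c == ',')) = []) :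
    pvSplit s = [s.takeWhile (fun c => !(c == ','))] := by
  rw [pvSplit]
  split
  · rfl
  · rename_i heq; rw [h] at heq; cases heq

theorem pv_pvSplit_cons (s : List Char) (c : Char) (rest : List Char)
    (h : s.dropWhile (fun c => !(c == ',')) = c :: rest) :
    pvSplit s = s.takeWhile (fun c => !(c == ',')) :: pvSplit rest := by
  rw [pvSplit]
  split
  · rename_i heq; rw [h] at heq; cases heq
  · rename_i c' rest' heq
    rw [h] at heq
    cases heq
    rfl

-- the head of a non-trivial dropWhile fails the predicate
theorem pv_dropWhile_head_false (f : Char → Bool) (s : List Char) (c : Char) (rest : List Char)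
    (h : s.dropWhile f = c :: rest) : f c = false := by
  have hne : s.dropWhile f ≠ [] := by simp [h]
  have h2 : (s.dropWhile f).head hne = c := by simp [h]
  have := List.head_dropWhile_not f hne
  rw [h2] at this
  simpa using this

-- splitOn.go with a single-character separator computes pvSplit
theorem pv_go_eq (fuel : Nat) (l cur : List Char) (acc : List (List Char))
    (hf : l.length < fuel) (hc : (',' : Char) ∉ cur) :
    PySem.Chars.splitOn.go [','] fuel l cur acc =
      acc.reverse ++ pvSplit (cur.reverse ++ l) := by
  induction fuel generalizing l cur acc with
  | zero => omega
  | succ n ih =>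
    have hfree : ∀ x ∈ cur.reverse, (fun c => !(c == ',')) x = true := by
      intro x hx
      simp only [Bool.not_eq_eq_eq_not, Bool.not_true, beq_eq_false_iff_ne]
      intro hx'
      exact hc (by simpa [hx'] using (List.mem_reverse.mp hx))
    match l with
    | [] =>
      rw [PySem.Chars.splitOn.go]
      · have hdrop : (cur.reverse ++ ([] : List Char)).dropWhile (fun c => !(c == ',')) = [] := by
          rw [List.append_nil]
          rw [List.dropWhile_eq_nil_iff]
          exact hfree
        rw [pv_pvSplit_nil _ hdrop, List.append_nil,
          List.takeWhile_eq_self_iff.mpr hfree]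
        simp
      · omega
    | c :: rest =>
      rw [PySem.Chars.splitOn.go]
      by_cases hcc : c = ','
      · subst hcc
        rw [if_pos (by simp [List.isPrefixOf])]
        rw [show List.drop ([','] : List Char).length (',' :: rest) = rest from rfl]
        rw [ih rest [] (cur.reverse :: acc) (by simpa using Nat.lt_of_succ_lt_succ hf) (by simp)]
        have hdrop : (cur.reverse ++ ',' :: rest).dropWhile (fun c => !(c == ',')) =
            ',' :: rest := by
          rw [List.dropWhile_append]
          simp [List.dropWhile_eq_nil_iff.mpr hfree]
        have htake : (cur.reverse ++ ',' :: rest).takeWhile (fun c => !(c == ',')) =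
            cur.reverse := by
          rw [List.takeWhile_append]
          simp [List.takeWhile_eq_self_iff.mpr hfree]
        rw [pv_pvSplit_cons _ _ _ hdrop, htake]
        simp
      · rw [if_neg (by simp [List.isPrefixOf, Ne.symm hcc])]
        rw [ih rest (c :: cur) acc (by simpa using Nat.lt_of_succ_lt_succ hf)
          (by simp; exact ⟨fun h => hcc h.symm, hc⟩)]
        simp

theorem pv_splitOn_eq (s : List Char) :
    PySem.Chars.splitOn s [','] = pvSplit s := by
  have := pv_go_eq (s.length + 1) s [] [] (by omega) (by simp)
  simpa [PySem.Chars.splitOn] using this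

-- rstrip through cons
theorem pv_rstrip_cons (c : Char) (l : List Char) :
    PySem.Chars.rstrip (c :: l) =
      if PySem.Chars.rstrip l = [] then (if PySem.Chars.isspace c then [] else [c])
      else c :: PySem.Chars.rstrip l := by
  simp only [PySem.Chars.rstrip, List.reverse_cons, List.dropWhile_append]
  by_cases h : List.dropWhile PySem.Chars.isspace l.reverse = []
  · cases hc : PySem.Chars.isspace c <;>
      simp [h, List.dropWhile_cons, hc]
  · have h' : (List.dropWhile PySem.Chars.isspace l.reverse).isEmpty = false := by
      simpa [List.isEmpty_iff] using h
    simp [h', List.reverse_eq_nil_iff, h]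

-- whitespace characters are unchanged by lowerChar
theorem pv_lowerChar_ws (c : Char) (h : PySem.Chars.isspace c = true) :
    PySem.Chars.lowerChar c = c := by
  have hs : ¬ ('A' ≤ c ∧ c ≤ 'Z') := by
    simp only [PySem.Chars.isspace, Bool.or_eq_true, Bool.and_eq_true,
      decide_eq_true_eq] at h
    intro ⟨h1, h2⟩
    simp only [Char.le_def, UInt32.le_iff_toNat_le] at h1 h2
    rw [show ('A').val.toNat = 65 from rfl] at h1
    rw [show ('Z').val.toNat = 90 from rfl] at h2
    simp only [Char.toNat] at h
    omega
  simp only [PySem.Chars.lowerChar, PySem.Chars.isupper]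
  rw [if_neg (by simpa using hs)]

-- the scanner inside a token (buffer non-empty): everything is appended lowered,
-- `keep` tracks the length up to the last non-whitespace character
theorem pv_scan_fill (p : List Char) (hp : (',' : Char) ∉ p)
    (ku : PySem.Set String × PySem.Set String) (buf : List Char) (hb : buf ≠ [])
    (keep : Nat) :
    p.foldl pvScanStep (ku, (buf, keep)) =
      (ku, (buf ++ PySem.Chars.lower p,
        if PySem.Chars.rstrip p = [] then keep
        else buf.length + (PySem.Chars.rstrip p).length)) := by
  induction p generalizing buf keep with
  | nil => simp [PySem.Chars.lower, PySem.Chars.rstrip]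
  | cons c rest ih =>
    have hc : c ≠ ',' := fun h => hp (by simp [h])
    have hrest : (',' : Char) ∉ rest := fun h => hp (List.mem_cons_of_mem _ h)
    rw [List.foldl_cons]
    cases hws : PySem.Chars.isspace c with
    | true =>
      have hstep : pvScanStep (ku, (buf, keep)) c = (ku, (buf ++ [c], keep)) := by
        simp [pvScanStep, hc, hws, hb]
      rw [hstep, ih hrest (buf ++ [c]) (by simp) keep]
      rw [pv_rstrip_cons]
      by_cases h0 : PySem.Chars.rstrip rest = []
      · simp [h0, hws, PySem.Chars.lower, pv_lowerChar_ws c hws]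
      · simp [h0, hws, PySem.Chars.lower, pv_lowerChar_ws c hws]
        omega
    | false =>
      have hstep : pvScanStep (ku, (buf, keep)) c =
          (ku, (buf ++ [PySem.Chars.lowerChar c], buf.length + 1)) := by
        simp [pvScanStep, hc, hws]
      rw [hstep, ih hrest (buf ++ [PySem.Chars.lowerChar c]) (by simp) (buf.length + 1)]
      rw [pv_rstrip_cons]
      by_cases h0 : PySem.Chars.rstrip rest = []
      · simp [h0, hws, PySem.Chars.lower]
      · simp [h0, hws, PySem.Chars.lower]
        omega

-- the scanner over one whole comma-free part, from an empty buffer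
theorem pv_scan_part (p : List Char) (hp : (',' : Char) ∉ p)
    (ku : PySem.Set String × PySem.Set String) :
    p.foldl pvScanStep (ku, ([], 0)) =
      (ku, (PySem.Chars.lower (PySem.Chars.lstrip p), (PySem.Chars.strip p).length)) := by
  induction p with
  | nil => simp [PySem.Chars.lower, PySem.Chars.lstrip, PySem.Chars.strip, PySem.Chars.rstrip]
  | cons c rest ih =>
    have hc : c ≠ ',' := fun h => hp (by simp [h])
    have hrest : (',' : Char) ∉ rest := fun h => hp (List.mem_cons_of_mem _ h)
    rw [List.foldl_cons]
    cases hws : PySem.Chars.isspace c with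
    | true =>
      have hstep : pvScanStep (ku, (([] : List Char), 0)) c = (ku, (([] : List Char), 0)) := by
        simp [pvScanStep, hc, hws]
      rw [hstep, ih hrest]
      simp [PySem.Chars.lstrip, PySem.Chars.strip, hws]
    | false =>
      have hstep : pvScanStep (ku, (([] : List Char), 0)) c =
          (ku, ([PySem.Chars.lowerChar c], 1)) := by
        simp [pvScanStep, hc, hws]
      rw [hstep, pv_scan_fill rest hrest ku [PySem.Chars.lowerChar c] (by simp) 1]
      have hl : PySem.Chars.lstrip (c :: rest) = c :: rest := by
        simp [PySem.Chars.lstrip, hws]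
      have hs : PySem.Chars.strip (c :: rest) = PySem.Chars.rstrip (c :: rest) := by
        simp [PySem.Chars.strip, hl]
      rw [hs, pv_rstrip_cons]
      by_cases h0 : PySem.Chars.rstrip rest = []
      · simp [h0, hws, hl, PySem.Chars.lower]
      · simp [h0, hws, hl, PySem.Chars.lower]
        omega

-- rstrip is a prefix, so buf[:keep] is exactly the lowered strip
theorem pv_take_lower_strip (p : List Char) :
    (PySem.Chars.lower (PySem.Chars.lstrip p)).take (PySem.Chars.strip p).length =
      PySem.Chars.lower (PySem.Chars.strip p) := by
  have hpre : PySem.Chars.rstrip (PySem.Chars.lstrip p) <+: PySem.Chars.lstrip p := by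
    apply List.reverse_suffix.mp
    have := List.dropWhile_suffix (l := (PySem.Chars.lstrip p).reverse) PySem.Chars.isspace
    simpa [PySem.Chars.rstrip] using this
  have htake := List.prefix_iff_eq_take.mp hpre
  show (PySem.Chars.lower _).take (PySem.Chars.rstrip (PySem.Chars.lstrip p)).length = _
  rw [PySem.Chars.lower, ← List.map_take, ← htake]
  rfl

-- B's per-part effect, written on the cleaned token
def pvFlushPart (ku : PySem.Set String × PySem.Set String) (p : List Char) :
    PySem.Set String × PySem.Set String :=
  pvScanFlush ku (PySem.Chars.lower (PySem.Chars.strip p))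

-- one comma-free part followed by a comma: scan = flush of the cleaned part
theorem pv_scan_one (p : List Char) (hp : (',' : Char) ∉ p)
    (ku : PySem.Set String × PySem.Set String) :
    (p ++ [',']).foldl pvScanStep (ku, ([], 0)) = (pvFlushPart ku p, ([], 0)) := by
  rw [List.foldl_append, pv_scan_part p hp ku]
  simp [pvScanStep, pv_take_lower_strip, pvFlushPart]

-- the full scan is the fold of the flushes over the comma-split parts
theorem pv_scan_eq_parts (s : List Char) :
    ∀ ku : PySem.Set String × PySem.Set String,
    (s ++ [',']).foldl pvScanStep (ku, ([], 0)) =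
      ((pvSplit s).foldl pvFlushPart ku, ([], 0)) := by
  induction s using pvSplit.induct with
  | case1 s h =>
    intro ku
    have hfree : (',' : Char) ∉ s := by
      intro hm
      have := List.dropWhile_eq_nil_iff.mp h ',' hm
      simp at this
    have htake : s.takeWhile (fun c => !(c == ',')) = s :=
      List.takeWhile_eq_self_iff.mpr (by
        intro x hx
        simp only [Bool.not_eq_eq_eq_not, Bool.not_true, beq_eq_false_iff_ne]
        intro hx'; exact hfree (by simpa [hx'] using hx))
    rw [pv_pvSplit_nil _ h, htake]
    simpa using pv_scan_one s hfree ku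
  | case2 s c rest h ih =>
    intro ku
    have hc : c = ',' := by
      have := pv_dropWhile_head_false _ _ _ _ h
      simpa using this
    subst hc
    have hsplit : s = s.takeWhile (fun c => !(c == ',')) ++ (',' :: rest) := by
      conv_lhs => rw [← List.takeWhile_append_dropWhile (p := fun c => !(c == ',')) (l := s)]
      rw [h]
    have hfree : (',' : Char) ∉ s.takeWhile (fun c => !(c == ',')) := by
      intro hm
      have := List.mem_takeWhile_imp hm
      simp at this
    rw [pv_pvSplit_cons _ _ _ h, List.foldl_cons]
    conv_lhs => rw [hsplit]
    rw [show (s.takeWhile (fun c => !(c == ',')) ++ (',' :: rest)) ++ [','] =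
        (s.takeWhile (fun c => !(c == ',')) ++ [',']) ++ (rest ++ [',']) from by simp]
    rw [List.foldl_append, pv_scan_one _ hfree ku,
      ih (pvFlushPart ku (s.takeWhile (fun c => !(c == ','))))]

-- loop body of the staged reformulation of B: a part is cleaned, then routed
def pvStepB (acc : PySem.Set String × PySem.Set String) (part : String) :
    PySem.Set String × PySem.Set String :=
  let cleaned := pvCleaned part
  if cleaned = "" then acc
  else
    let ext := pvDotted cleaned
    if PySem.Set.contains pvSupportedBookExts ext then (PySem.Set.add acc.1 ext, acc.2)
    else (acc.1, PySem.Set.add acc.2 ext)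

-- the flush of a cleaned char-level part is pvStepB on the corresponding String part
theorem pv_flush_eq_stepB (ku : PySem.Set String × PySem.Set String) (p : List Char) :
    pvFlushPart ku p = pvStepB ku (String.ofList p) := by
  have hclean : pvCleaned (String.ofList p) =
      String.ofList (PySem.Chars.lower (PySem.Chars.strip p)) := by
    rw [← String.toList_inj]
    simp [pvCleaned]
  rw [pvStepB, hclean]
  by_cases h0 : PySem.Chars.lower (PySem.Chars.strip p) = []
  · simp [pvFlushPart, pvScanFlush, h0]
  · have h1 : String.ofList (PySem.Chars.lower (PySem.Chars.strip p)) ≠ "" := by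
      rw [show ("" : String) = String.ofList [] from rfl]
      simpa [String.ofList_inj] using h0
    have hdot : pvDotted (String.ofList (PySem.Chars.lower (PySem.Chars.strip p))) =
        String.ofList (if PySem.Chars.startswith (PySem.Chars.lower (PySem.Chars.strip p)) ['.']
          then PySem.Chars.lower (PySem.Chars.strip p)
          else '.' :: PySem.Chars.lower (PySem.Chars.strip p)) := by
      rw [pvDotted, PySem.Str.startswith_eq]
      simp only [String.toList_ofList]
      rw [show (".".toList) = ['.'] from rfl]
      by_cases hsw : PySem.Chars.startswith (PySem.Chars.lower (PySem.Chars.strip p)) ['.'] = true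
      · simp [hsw]
      · simp only [Bool.not_eq_true] at hsw
        simp only [hsw, if_neg Bool.false_ne_true]
        rw [show ('.' :: PySem.Chars.lower (PySem.Chars.strip p)) =
            ['.'] ++ PySem.Chars.lower (PySem.Chars.strip p) from rfl, String.ofList_append]
    simp only [pvFlushPart, pvScanFlush, if_neg h0, if_neg h1, hdot]
  
-- B computes the first component of the staged partition fold over A's parts
theorem pv_alt_eq (ext_value : String) :
    normalize_allowed_exts_alt ext_value =
      ((((PySem.Str.split? ext_value ",").getD []).foldl pvStepB
        (PySem.Set.empty, PySem.Set.empty))).1 := by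
  have hps : (PySem.Str.split? ext_value ",").getD [] =
      (PySem.Chars.splitOn ext_value.toList [',']).map String.ofList := by
    have hbridge := PySem.Str.split?_map ext_value ","
    rw [show (",".toList) = [','] from rfl] at hbridge
    rw [show PySem.Chars.split? ext_value.toList [','] =
        some (PySem.Chars.splitOn ext_value.toList [',']) from by simp [PySem.Chars.split?]]
      at hbridge
    cases hso : PySem.Str.split? ext_value "," with
    | none => rw [hso] at hbridge; simp at hbridge
    | some ps =>
      rw [hso] at hbridge
      simp only [Option.map_some, Option.some_inj] at hbridge
      rw [← hbridge]
      simp [List.map_map, Function.comp_def]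
  rw [hps, List.foldl_map]
  have hfun : ∀ (ku : PySem.Set String × PySem.Set String) (p : List Char),
      pvStepB ku (String.ofList p) = pvFlushPart ku p := fun ku p =>
    (pv_flush_eq_stepB ku p).symm
  simp only [hfun]
  rw [pv_splitOn_eq]
  have := pv_scan_eq_parts ext_value.toList (PySem.Set.empty, PySem.Set.empty)
  rw [normalize_allowed_exts_alt, show (ext_value ++ ",").toList = ext_value.toList ++ [','] from by simp, this]

-- membership: every char of every piece produced by splitOn.go comes from the input or the accumulators
theorem pv_go_mem (sep : List Char) (fuel : Nat) (l cur : List Char) (acc : List (List Char))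
    (part : List Char) (c : Char)
    (hp : part ∈ PySem.Chars.splitOn.go sep fuel l cur acc) (hc : c ∈ part) :
    c ∈ l ∨ c ∈ cur ∨ ∃ p ∈ acc, c ∈ p := by
  induction fuel generalizing l cur acc with
  | zero =>
    simp [PySem.Chars.splitOn.go] at hp
    rcases hp with h | h
    · right; right; exact ⟨part, h, hc⟩
    · subst h; simp at hc; rcases hc with h | h
      · right; left; simpa using h
      · left; exact h
  | succ n ih =>
    match l with
    | [] =>
      simp [PySem.Chars.splitOn.go] at hp
      rcases hp with h | h
      · right; right; exact ⟨part, h, hc⟩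
      · subst h; right; left; simpa using hc
    | ch :: rest =>
      rw [PySem.Chars.splitOn.go] at hp
      split at hp
      · rcases ih _ _ _ hp with h | h | h
        · left; exact List.mem_of_mem_drop h
        · simp at h
        · rcases h with ⟨p, hpm, hcp⟩
          simp at hpm
          rcases hpm with h | h
          · right; left; rw [h] at hcp; simpa using hcp
          · right; right; exact ⟨p, h, hcp⟩
      · rcases ih _ _ _ hp with h | h | h
        · left; exact List.mem_cons_of_mem _ h
        · simp at h; rcases h with h | h
          · left; simp [h]
          · right; left; exact h
        · right; right; exact h

theorem pv_mem_splitOn (s sep part : List Char) (c : Char)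
    (hp : part ∈ PySem.Chars.splitOn s sep) (hc : c ∈ part) : c ∈ s := by
  rcases pv_go_mem sep (s.length + 1) s [] [] part c hp hc with h | h | h
  · exact h
  · simp at h
  · simp at h

-- a string whose chars are all whitespace strips to []
theorem pv_strip_of_all_isspace (cs : List Char) (h : ∀ c ∈ cs, PySem.Chars.isspace c = true) :
    PySem.Chars.strip cs = [] := by
  have h1 : PySem.Chars.lstrip cs = [] := by
    simp [PySem.Chars.lstrip, List.dropWhile_eq_nil_iff]; exact h
  simp [PySem.Chars.strip, h1, PySem.Chars.rstrip]

-- conversely, strip cs = [] forces every char to be whitespace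
theorem pv_all_isspace_of_strip (cs : List Char) (h : PySem.Chars.strip cs = []) :
    ∀ c ∈ cs, PySem.Chars.isspace c = true := by
  have h2 := h
  simp only [PySem.Chars.strip, PySem.Chars.rstrip, PySem.Chars.lstrip,
    List.reverse_eq_nil_iff] at h2
  have h1 : ∀ c ∈ List.dropWhile PySem.Chars.isspace cs, PySem.Chars.isspace c = true :=
    fun c hc => List.dropWhile_eq_nil_iff.mp h2 c (List.mem_reverse.mpr hc)
  intro c hc
  rw [← List.takeWhile_append_dropWhile (p := PySem.Chars.isspace) (l := cs)] at hc
  rcases List.mem_append.mp hc with h2 | h2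
  · exact List.mem_takeWhile_imp h2
  · exact h1 c h2

-- if the whole input strips to "", every comma-piece cleans to ""
theorem pv_cleaned_empty (ext_value part : String)
    (hs : PySem.Str.strip ext_value = "")
    (hp : part ∈ (PySem.Str.split? ext_value ",").getD []) :
    pvCleaned part = "" := by
  have hall : ∀ c ∈ ext_value.toList, PySem.Chars.isspace c = true := by
    apply pv_all_isspace_of_strip
    have := congrArg String.toList hs
    simpa [PySem.Str.toList_strip] using this
  have hbridge := PySem.Str.split?_map ext_value ","
  have hsep : ("," : String).toList = [','] := rfl
  rw [hsep] at hbridge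
  have hsplit : PySem.Chars.split? ext_value.toList [','] =
      some (PySem.Chars.splitOn ext_value.toList [',']) := by
    simp [PySem.Chars.split?]
  rw [hsplit] at hbridge
  cases hso : PySem.Str.split? ext_value "," with
  | none => rw [hso] at hbridge; simp at hbridge
  | some ps =>
    rw [hso] at hbridge
    simp at hbridge
    rw [hso] at hp
    simp at hp
    have hmem : part.toList ∈ PySem.Chars.splitOn ext_value.toList [','] := by
      rw [← hbridge]; exact List.mem_map_of_mem hp
    have hps : ∀ c ∈ part.toList, PySem.Chars.isspace c = true := fun c hc =>
      hall c (pv_mem_splitOn _ _ _ _ hmem hc)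
    have : (pvCleaned part).toList = [] := by
      simp [pvCleaned, PySem.Str.toList_lower, PySem.Str.toList_strip,
        pv_strip_of_all_isspace part.toList hps, PySem.Chars.lower]
    rw [← String.toList_inj]
    simpa using this

-- the staged fold does nothing on pieces that clean to ""
theorem pv_foldB_fixed (parts : List String) (acc : PySem.Set String × PySem.Set String)
    (h : ∀ p ∈ parts, pvCleaned p = "") : parts.foldl pvStepB acc = acc := by
  induction parts generalizing acc with
  | nil => rfl
  | cons p rest ih =>
    have hp : pvCleaned p = "" := h p (List.mem_cons_self)
    simp only [List.foldl_cons, pvStepB, hp]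
    exact ih acc fun q hq => h q (List.mem_cons_of_mem _ hq)

-- filter through PySem.Set.add, when the added element satisfies the filter
theorem pv_add_filter_true {α : Type} [BEq α] [LawfulBEq α] (p : α → Bool) (s : List α) (x : α)
    (hx : p x = true) : (PySem.Set.add s x).filter p = PySem.Set.add (s.filter p) x := by
  by_cases hm : x ∈ s
  · have hmf : x ∈ s.filter p := List.mem_filter.mpr ⟨hm, hx⟩
    simp [PySem.Set.add, hm, hmf]
  · have hmf : x ∉ s.filter p := fun h => hm (List.mem_filter.mp h).1
    simp [PySem.Set.add, hm, hmf, List.filter_append, hx]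

-- filter through PySem.Set.add, when the added element fails the filter
theorem pv_add_filter_false {α : Type} [BEq α] [LawfulBEq α] (p : α → Bool) (s : List α) (x : α)
    (hx : p x = false) : (PySem.Set.add s x).filter p = s.filter p := by
  by_cases hm : x ∈ s
  · simp [PySem.Set.add, hm]
  · simp [PySem.Set.add, hm, List.filter_append, hx]

-- the partition invariant: the staged pair is exactly (supported, unsupported) filters of A's set
theorem pv_partition (parts : List String) (s : PySem.Set String) :
    parts.foldl pvStepB
        (s.filter (fun e => PySem.Set.contains pvSupportedBookExts e),
         s.filter (fun e => !PySem.Set.contains pvSupportedBookExts e))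
      = ((parts.foldl pvStepA s).filter (fun e => PySem.Set.contains pvSupportedBookExts e),
         (parts.foldl pvStepA s).filter (fun e => !PySem.Set.contains pvSupportedBookExts e)) := by
  induction parts generalizing s with
  | nil => rfl
  | cons p rest ih =>
    simp only [List.foldl_cons, pvStepA, pvStepB]
    by_cases hc : pvCleaned p = ""
    · rw [if_pos hc, if_pos hc]
      exact ih s
    · rw [if_neg hc, if_neg hc]
      cases hf : PySem.Set.contains pvSupportedBookExts (pvDotted (pvCleaned p)) with
      | true =>
        rw [if_pos rfl,
          ← pv_add_filter_true (fun e => PySem.Set.contains pvSupportedBookExts e) s (pvDotted (pvCleaned p)) hf,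
          ← pv_add_filter_false (fun e => !PySem.Set.contains pvSupportedBookExts e) s (pvDotted (pvCleaned p))
            (by simp only [hf, Bool.not_true])]
        exact ih _
      | false =>
        rw [if_neg Bool.false_ne_true,
          ← pv_add_filter_false (fun e => PySem.Set.contains pvSupportedBookExts e) s (pvDotted (pvCleaned p)) hf,
          ← pv_add_filter_true (fun e => !PySem.Set.contains pvSupportedBookExts e) s (pvDotted (pvCleaned p))
            (by simp only [hf, Bool.not_false])]
        exact ih _

-- ===== VERDICT (by name: the statement is the Claim_ definition above) =====
theorem normalize_allowed_exts_spec : Claim_equal_normalize_allowed_exts := by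
  intro ext_value _
  show normalize_allowed_exts ext_value = normalize_allowed_exts_alt ext_value
  rw [pv_alt_eq]
  by_cases hs : PySem.Str.strip ext_value = ""
  · -- A short-circuits to the empty set; the staged fold never fires
    have hb : (((PySem.Str.split? ext_value ",").getD []).foldl pvStepB
        (PySem.Set.empty, PySem.Set.empty)).1 = [] := by
      rw [pv_foldB_fixed _ _ (fun p hp => pv_cleaned_empty ext_value p hs hp)]
      rfl
    have ha : normalize_allowed_exts ext_value = [] := by
      simp [normalize_allowed_exts, normalize_extensions, hs, PySem.Set.empty]
    rw [ha, hb]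
  · unfold normalize_allowed_exts
    have hA : normalize_extensions ext_value =
        ((PySem.Str.split? ext_value ",").getD []).foldl pvStepA PySem.Set.empty := by
      simp [normalize_extensions, hs]
    have hpart := pv_partition ((PySem.Str.split? ext_value ",").getD []) PySem.Set.empty
    have hB : (((PySem.Str.split? ext_value ",").getD []).foldl pvStepB
        (PySem.Set.empty, PySem.Set.empty)).1
        = (normalize_extensions ext_value).filter
            (fun e => PySem.Set.contains pvSupportedBookExts e) := by
      rw [hA]
      rw [show ((PySem.Set.empty : PySem.Set String), (PySem.Set.empty : PySem.Set String)) =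
          ((PySem.Set.empty : List String).filter (fun e => PySem.Set.contains pvSupportedBookExts e),
           (PySem.Set.empty : List String).filter (fun e => !PySem.Set.contains pvSupportedBookExts e))
        from rfl]
      rw [hpart]
    rw [hB]
    set S := normalize_extensions ext_value with hSdef
    by_cases hS : S = []
    · simp [hS]
    · rw [if_neg hS]
      by_cases hu : PySem.List.sorted
          (S.filter (fun ext => !PySem.Set.contains pvSupportedBookExts ext)) (fun x => x) false = []
      · rw [if_pos hu]
        have h0 : S.filter (fun ext => !PySem.Set.contains pvSupportedBookExts ext) = [] :=
          (PySem.List.sorted_eq_nil_iff _ _ _).mp hu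
        have hall : ∀ e ∈ S, (fun ext => PySem.Set.contains pvSupportedBookExts ext) e = true := by
          intro e he
          by_contra hne
          rw [Bool.not_eq_true] at hne
          have hmem : e ∈ S.filter (fun ext => !PySem.Set.contains pvSupportedBookExts ext) :=
            List.mem_filter.mpr ⟨he, by simp only [hne, Bool.not_false]⟩
          rw [h0] at hmem
          exact List.not_mem_nil hmem
        exact (List.filter_eq_self.mpr hall).symm
      · rw [if_neg hu]
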